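-- pv_equiv track=rewrite | github.com/ZachData/MetastableStateAnalysis | p4_mstate_features/activation_trajectories.py | _model_to_cc_layer
-- ===== SOURCE A (Python) =====
-- from typing import Optional
--
-- def _model_to_cc_layer(
--     model_layer: int, layer_indices: list
-- ) -> Optional[int]:
--     """Map a model layer to the nearest crosscoder layer index."""
--     if model_layer in layer_indices:
--         return layer_indices.index(model_layer)
--     # Find nearest
--     dists = [abs(model_layer - li) for li in layer_indices]
--     min_dist = min(dists)
--     if min_dist <= 2:  # within 2 layers
--         return dists.index(min_dist)
--     return None
-- ===== SOURCE B (Python) =====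
-- def _model_to_cc_layer(model_layer, layer_indices):
--     """Map a model layer to the nearest crosscoder layer index.
--
--     Builds a first-occurrence position index once, then probes only the five
--     candidate values model_layer-2 .. model_layer+2 in order of distance."""
--     first_pos = {}
--     for i, li in enumerate(layer_indices):
--         if li not in first_pos:
--             first_pos[li] = i
--     for d in (0, 1, 2):
--         hits = [first_pos[v] for v in (model_layer - d, model_layer + d) if v in first_pos]
--         if hits:
--             return min(hits)
--     return None
-- ===== Notes on version B (the rewrite author's own statement) =====
-- stated objective: alternative
-- what changed: Instead of scanning for membership/min/index over the whole list, B builds a first-occurrence position dictionary in one pass and then probes only the five candidate values within the fixed tolerance (model_layer-2 .. model_layer+2) in order of distance, returning the smallest index found.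
import Mathlib
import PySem

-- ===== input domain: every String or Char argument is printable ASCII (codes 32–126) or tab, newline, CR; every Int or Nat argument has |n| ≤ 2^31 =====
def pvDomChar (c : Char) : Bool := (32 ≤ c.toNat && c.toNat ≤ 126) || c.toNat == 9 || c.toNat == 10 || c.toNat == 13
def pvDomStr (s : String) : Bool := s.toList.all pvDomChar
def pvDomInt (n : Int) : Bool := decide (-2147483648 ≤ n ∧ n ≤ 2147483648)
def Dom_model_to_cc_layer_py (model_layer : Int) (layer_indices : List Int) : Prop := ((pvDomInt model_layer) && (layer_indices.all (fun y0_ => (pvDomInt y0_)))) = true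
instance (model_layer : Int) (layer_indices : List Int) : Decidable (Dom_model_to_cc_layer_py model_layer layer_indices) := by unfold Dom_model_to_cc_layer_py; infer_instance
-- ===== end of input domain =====

-- B replaces A's whole-list scans (membership, distance list, min, index) by a first-occurrence
-- position dictionary built once, probed at the five candidate values within the fixed tolerance;
-- objective: alternative.

-- ===== PORT A =====
def model_to_cc_layer_py (model_layer : Int) (layer_indices : List Int) : Option Int :=
  if layer_indices.contains model_layer then
    (PySem.List.index? layer_indices model_layer).map (fun n : Nat => (n : Int))
  else
    match PySem.List.min? (layer_indices.map (fun li => |model_layer - li|)) (fun x => x) with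
    | none => none  -- Python: min([]) raises ValueError; excluded by Pre_
    | some min_dist =>
      if min_dist ≤ 2 then
        (PySem.List.index? (layer_indices.map (fun li => |model_layer - li|)) min_dist).map (fun n : Nat => (n : Int))
      else none

-- ===== PORT B =====
def model_to_cc_layer_py_alt (model_layer : Int) (layer_indices : List Int) : Option Int :=
  -- first_pos = first-occurrence index of each value, built in one pass
  let first_pos : PySem.Dict Int Int :=
    (PySem.List.enumerate layer_indices).foldl
      (fun d p => if d.contains p.2 then d else d.insert p.2 p.1)
      PySem.Dict.empty
  -- hits(d) = [first_pos[v] for v in (model_layer - d, model_layer + d) if v in first_pos]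
  let probe : Int → List Int := fun d =>
    [model_layer - d, model_layer + d].filterMap
      (fun v => if first_pos.contains v then first_pos.get? v else none)
  -- for d in (0, 1, 2): if hits: return min(hits)  (unrolled)
  match PySem.List.min? (probe 0) (fun x => x) with
  | some k => some k
  | none =>
    match PySem.List.min? (probe 1) (fun x => x) with
    | some k => some k
    | none =>
      match PySem.List.min? (probe 2) (fun x => x) with
      | some k => some k
      | none => none

-- ===== PRECONDITION & SPEC =====
-- A raises ValueError (min() of an empty sequence) on the empty list; nothing else is excluded.
def Pre_model_to_cc_layer_py (model_layer : Int) (layer_indices : List Int) : Prop :=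
  layer_indices ≠ []
instance (model_layer : Int) (layer_indices : List Int) : Decidable (Pre_model_to_cc_layer_py model_layer layer_indices) := by unfold Pre_model_to_cc_layer_py; infer_instance

def pvWitness_model_to_cc_layer_py : Int × List Int := (3, [0, 4, 8])

def Spec_model_to_cc_layer_py (model_layer : Int) (layer_indices : List Int) (out : Option Int) : Prop := out = model_to_cc_layer_py_alt model_layer layer_indices
instance (model_layer : Int) (layer_indices : List Int) (out : Option Int) : Decidable (Spec_model_to_cc_layer_py model_layer layer_indices out) := by unfold Spec_model_to_cc_layer_py; infer_instance

-- ===== CLAIM (what is proved, stated in full; the proofs are below) =====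
def Claim_equal_model_to_cc_layer_py : Prop := ∀ (model_layer : Int) (layer_indices : List Int), Dom_model_to_cc_layer_py model_layer layer_indices → Pre_model_to_cc_layer_py model_layer layer_indices → Spec_model_to_cc_layer_py model_layer layer_indices (model_to_cc_layer_py model_layer layer_indices)

-- ===== LEMMAS AND PROOFS =====

-- Reference form both ports are reduced to: first index at distance d (as an Int), tried for d = 0, 1, 2.
def pvFd (m : Int) (xs : List Int) (d : Int) : Option Int :=
  (xs.findIdx? (fun li => |m - li| == d)).map (fun n : Nat => (n : Int))

def pvChain (m : Int) (xs : List Int) : Option Int :=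
  match pvFd m xs 0 with
  | some k => some k
  | none =>
    match pvFd m xs 1 with
    | some k => some k
    | none =>
      match pvFd m xs 2 with
      | some k => some k
      | none => none

-- The first-occurrence dictionary lookup is index? (shifted by the enumerate start).
theorem pvDictLookup (v : Int) : ∀ (xs : List Int) (s : Int) (d : PySem.Dict Int Int),
    ((PySem.List.enumerate xs s).foldl
        (fun d p => if d.contains p.2 then d else d.insert p.2 p.1) d).get? v
      = (match d.get? v with
         | some i => some i
         | none => (PySem.List.index? xs v).map (fun n : Nat => s + (n : Int))) := by
  intro xs
  induction xs with
  | nil => intro s d; cases h : d.get? v <;> simp [PySem.List.enumerate_nil, h]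
  | cons x t ih =>
    intro s d
    rw [PySem.List.enumerate_cons, List.foldl_cons, ih]
    by_cases hxv : x = v
    · subst hxv
      rw [PySem.List.index?_cons_self]
      by_cases hc : d.contains x = true
      · have : (d.get? x).isSome := by rw [← PySem.Dict.contains_eq_isSome_get?]; exact hc
        obtain ⟨i, hi⟩ := Option.isSome_iff_exists.mp this
        simp [hc, hi]
      · have hnone : d.get? x = none := by
          cases h : d.get? x with
          | none => rfl
          | some i =>
            exfalso; apply hc
            rw [PySem.Dict.contains_eq_isSome_get?, h]; rfl
        simp [hc, hnone, PySem.Dict.get?_insert_self]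
    · rw [PySem.List.index?_cons_of_ne _ (fun h => hxv h)]
      by_cases hc : d.contains x = true
      · cases h : d.get? v with
        | none =>
          cases hidx : PySem.List.index? t v with
          | none => simp [hc, h, hidx]
          | some n => simp [hc, h, hidx]; omega
        | some i => simp [hc, h]
      · rw [if_neg hc, PySem.Dict.get?_insert_of_ne _ _ (fun h => hxv h.symm)]
        cases h : d.get? v with
        | none =>
          cases hidx : PySem.List.index? t v with
          | none => simp [h, hidx]
          | some n => simp [h, hidx]; omega
        | some i => simp [h]

-- index? on a mapped list is findIdx? of the composed predicate.
theorem pvIndexMap (f : Int → Int) (c : Int) : ∀ xs : List Int,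
    PySem.List.index? (xs.map f) c = xs.findIdx? (fun x => f x == c) := by
  intro xs
  induction xs with
  | nil => rfl
  | cons x t ih =>
    rw [List.map_cons, List.findIdx?_cons]
    by_cases h : f x = c
    · subst h; rw [PySem.List.index?_cons_self]; simp
    · rw [PySem.List.index?_cons_of_ne _ h, ih]; simp [h]

-- min over a two-candidate filterMap, as an option combinator.
def pvComb (o1 o2 : Option Int) : Option Int :=
  match o1, o2 with
  | none, none => none
  | some i, none => some i
  | none, some j => some j
  | some i, some j => some (if j < i then j else i)

theorem pvCombine (g : Int → Option Int) (a b : Int) :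
    PySem.List.min? ([a, b].filterMap g) (fun x => x) = pvComb (g a) (g b) := by
  cases ha : g a <;> cases hb : g b <;>
    simp [List.filterMap, ha, hb, PySem.List.min?, pvComb] <;> split_ifs <;> simp

theorem pvCombShift (o1 o2 : Option Int) :
    pvComb (o1.map (· + 1)) (o2.map (· + 1)) = (pvComb o1 o2).map (· + 1) := by
  cases o1 <;> cases o2 <;> simp [pvComb] <;> split_ifs <;> simp

-- min over the two candidate first-occurrence indices = first index matching either value.
theorem pvMin2 (a b : Int) : ∀ xs : List Int,
    pvComb ((PySem.List.index? xs a).map (fun n : Nat => (n : Int)))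
           ((PySem.List.index? xs b).map (fun n : Nat => (n : Int)))
      = (xs.findIdx? (fun li => li == a || li == b)).map (fun n : Nat => (n : Int)) := by
  have hcast : ∀ o : Option Nat,
      (o.map (fun n : Nat => n + 1)).map (fun n : Nat => (n : Int))
        = (o.map (fun n : Nat => (n : Int))).map (· + 1) := by
    intro o; cases o <;> simp
  intro xs
  induction xs with
  | nil => rfl
  | cons x t ih =>
    rw [List.findIdx?_cons]
    by_cases hxa : x = a
    · subst hxa
      rw [PySem.List.index?_cons_self]
      by_cases hxb : x = b
      · subst hxb; rw [PySem.List.index?_cons_self]; simp [pvComb]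
      · rw [PySem.List.index?_cons_of_ne _ hxb]
        cases h : PySem.List.index? t b with
        | none => simp [pvComb]
        | some j => simp [pvComb]; omega
    · by_cases hxb : x = b
      · subst hxb
        rw [PySem.List.index?_cons_self, PySem.List.index?_cons_of_ne _ hxa]
        cases h : PySem.List.index? t a with
        | none => simp [pvComb]
        | some i => simp [pvComb]
      · rw [if_neg (by simp [hxa, hxb])]
        rw [PySem.List.index?_cons_of_ne _ hxa, PySem.List.index?_cons_of_ne _ hxb,
            hcast, hcast, pvCombShift, ih, hcast]

-- the candidate-pair predicate is the distance predicate (for 0 ≤ d).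
theorem pvPred (m d : Int) (hd : 0 ≤ d) :
    (fun li : Int => li == m - d || li == m + d) = (fun li : Int => |m - li| == d) := by
  funext li
  apply Bool.eq_iff_iff.mpr
  simp only [Bool.or_eq_true, beq_iff_eq]
  rw [abs_eq hd]
  omega

-- B computes pvChain.
theorem pvAltEq (m : Int) (xs : List Int) : model_to_cc_layer_py_alt m xs = pvChain m xs := by
  unfold model_to_cc_layer_py_alt pvChain pvFd
  have hget : ∀ v, ((PySem.List.enumerate xs 0).foldl
      (fun d p => if d.contains p.2 then d else d.insert p.2 p.1) PySem.Dict.empty).get? v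
      = (PySem.List.index? xs v).map (fun n : Nat => (n : Int)) := by
    intro v
    rw [pvDictLookup v xs 0 PySem.Dict.empty]
    simp [PySem.Dict.get?_empty]
  have hfun : (fun v => if (((PySem.List.enumerate xs 0).foldl
      (fun d p => if d.contains p.2 then d else d.insert p.2 p.1) PySem.Dict.empty)).contains v
      then (((PySem.List.enumerate xs 0).foldl
      (fun d p => if d.contains p.2 then d else d.insert p.2 p.1) PySem.Dict.empty)).get? v
      else none)
      = (fun v => (PySem.List.index? xs v).map (fun n : Nat => (n : Int))) := by
    funext v
    rw [PySem.Dict.contains_eq_isSome_get?, hget]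
    cases PySem.List.index? xs v <;> simp
  simp only [hfun]
  have hp : ∀ d : Int, 0 ≤ d →
      PySem.List.min? ([m - d, m + d].filterMap (fun v => (PySem.List.index? xs v).map (fun n : Nat => (n : Int)))) (fun x => x)
        = (xs.findIdx? (fun li => |m - li| == d)).map (fun n : Nat => (n : Int)) := by
    intro d hd
    rw [pvCombine, pvMin2, pvPred _ _ hd]
  rw [hp 0 (by omega), hp 1 (by omega), hp 2 (by omega)]

-- distance d occurs in xs iff pvFd finds an index.
theorem pvFdSome (m : Int) (xs : List Int) (d : Int) :
    (pvFd m xs d).isSome ↔ d ∈ xs.map (fun li => |m - li|) := by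
  unfold pvFd
  rw [Option.isSome_map, List.findIdx?_isSome, List.any_eq_true]
  simp only [List.mem_map, beq_iff_eq]

-- A computes pvChain on nonempty input.
theorem pvAEq (m : Int) (xs : List Int) (hne : xs ≠ []) :
    model_to_cc_layer_py m xs = pvChain m xs := by
  unfold model_to_cc_layer_py
  by_cases hm : m ∈ xs
  · rw [if_pos (by simpa using hm)]
    have h0 : pvFd m xs 0 = (PySem.List.index? xs m).map (fun n : Nat => (n : Int)) := by
      unfold pvFd
      rw [PySem.List.index?_eq_idxOf?]
      have : (fun li : Int => |m - li| == (0 : Int)) = (fun li : Int => li == m) := by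
        funext li
        apply Bool.eq_iff_iff.mpr
        simp only [beq_iff_eq]
        rw [abs_eq_zero]
        omega
      rw [this, List.idxOf?]
    have hsome : (pvFd m xs 0).isSome := by
      rw [h0, Option.isSome_map, PySem.List.index?_isSome_iff]; exact hm
    obtain ⟨k, hk⟩ := Option.isSome_iff_exists.mp hsome
    unfold pvChain
    rw [hk]
    exact h0 ▸ hk
  · rw [if_neg (by simpa using hm)]
    have hdne : xs.map (fun li => |m - li|) ≠ [] := by
      cases xs with
      | nil => exact absurd rfl hne
      | cons a t => simp
    have hmin : ∃ md, PySem.List.min? (xs.map (fun li => |m - li|)) (fun x => x) = some md := by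
      cases h : PySem.List.min? (xs.map (fun li => |m - li|)) (fun x => x) with
      | none => exact absurd ((PySem.List.min?_eq_none_iff _ _).mp h) hdne
      | some md => exact ⟨md, rfl⟩
    obtain ⟨md, hmd⟩ := hmin
    rw [hmd]
    dsimp only
    have hmdMem : md ∈ xs.map (fun li => |m - li|) := PySem.List.min?_mem hmd
    have hmdMin : ∀ y ∈ xs.map (fun li => |m - li|), md ≤ y := fun y hy => PySem.List.min?_isMin hmd y hy
    have hmd0 : 0 ≤ md := by
      obtain ⟨z, _, hz⟩ := List.mem_map.mp hmdMem
      rw [← hz]; exact abs_nonneg _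
    have hf0 : pvFd m xs 0 = none := by
      cases h : pvFd m xs 0 with
      | none => rfl
      | some k =>
        exfalso
        have : (0:Int) ∈ xs.map (fun li => |m - li|) := (pvFdSome m xs 0).mp (by rw [h]; rfl)
        obtain ⟨z, hzmem, hz⟩ := List.mem_map.mp this
        have : z = m := by have := abs_eq_zero.mp hz; omega
        exact hm (this ▸ hzmem)
    unfold pvChain
    rw [hf0]
    have hIdx : ∀ d : Int, (PySem.List.index? (xs.map (fun li => |m - li|)) d).map (fun n : Nat => (n : Int)) = pvFd m xs d := by
      intro d
      unfold pvFd
      rw [pvIndexMap]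
    cases h1 : pvFd m xs 1 with
    | some k =>
      have h1mem : (1:Int) ∈ xs.map (fun li => |m - li|) := (pvFdSome m xs 1).mp (by rw [h1]; rfl)
      have : md = 1 := by
        have hle := hmdMin 1 h1mem
        -- md ≠ 0 since 0 would put m in xs
        rcases lt_or_eq_of_le hmd0 with hlt | heq
        · omega
        · exfalso
          have : (0:Int) ∈ xs.map (fun li => |m - li|) := heq ▸ hmdMem
          obtain ⟨z, hzmem, hz⟩ := List.mem_map.mp this
          have : z = m := by have := abs_eq_zero.mp hz; omega
          exact hm (this ▸ hzmem)
      subst this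
      rw [if_pos (by omega)]
      exact (hIdx 1).trans h1
    | none =>
      cases h2 : pvFd m xs 2 with
      | some k =>
        have h2mem : (2:Int) ∈ xs.map (fun li => |m - li|) := (pvFdSome m xs 2).mp (by rw [h2]; rfl)
        have hne01 : md ≠ 0 ∧ md ≠ 1 := by
          constructor
          · intro heq
            have : (0:Int) ∈ xs.map (fun li => |m - li|) := heq ▸ hmdMem
            obtain ⟨z, hzmem, hz⟩ := List.mem_map.mp this
            have : z = m := by have := abs_eq_zero.mp hz; omega
            exact hm (this ▸ hzmem)
          · intro heq
            have : (pvFd m xs 1).isSome := (pvFdSome m xs 1).mpr (heq ▸ hmdMem)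
            rw [h1] at this; exact Bool.noConfusion this
        have : md = 2 := by
          have hle := hmdMin 2 h2mem
          omega
        subst this
        rw [if_pos (by omega)]
        exact (hIdx 2).trans h2
      | none =>
        have hne012 : md ≠ 0 ∧ md ≠ 1 ∧ md ≠ 2 := by
          refine ⟨?_, ?_, ?_⟩ <;> intro heq
          · have : (0:Int) ∈ xs.map (fun li => |m - li|) := heq ▸ hmdMem
            obtain ⟨z, hzmem, hz⟩ := List.mem_map.mp this
            have : z = m := by have := abs_eq_zero.mp hz; omega
            exact hm (this ▸ hzmem)
          · have : (pvFd m xs 1).isSome := (pvFdSome m xs 1).mpr (heq ▸ hmdMem)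
            rw [h1] at this; exact Bool.noConfusion this
          · have : (pvFd m xs 2).isSome := (pvFdSome m xs 2).mpr (heq ▸ hmdMem)
            rw [h2] at this; exact Bool.noConfusion this
        rw [if_neg (by omega)]

-- ===== VERDICT (by name: the statement is the Claim_ definition above) =====
theorem model_to_cc_layer_py_spec : Claim_equal_model_to_cc_layer_py := by
  intro m xs _dom hpre
  unfold Spec_model_to_cc_layer_py
  rw [pvAEq m xs hpre, pvAltEq]
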